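-- pv_equiv track=rewrite | github.com/ghkdemrdus/CodingTest_In_Programmers | 4주차/L2_롤케이크 자르기/Solution_조하담.py | solution
-- ===== SOURCE A (Python) =====
-- def solution(topping):
--     answer = 0
--     forward_set, backward_set = set(), set()
--     forward_list, backward_list = [], []
--
--     for v in topping:
--         forward_set.add(v)
--         forward_list.append(len(forward_set))
--
--     for v in topping[::-1]:
--         backward_set.add(v)
--         backward_list.append(len(backward_set))
--
--     backward_list.sort(reverse=True)
--
--     for i in range(len(topping)-1):
--         if forward_list [i] == backward_list[i+1]:
--             answer += 1
--
--     return answer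
-- ===== SOURCE B (Python) =====
-- def solution(topping):
--     remaining = {}
--     for v in topping:
--         remaining[v] = remaining.get(v, 0) + 1
--     suffix_distinct = len(remaining)
--     seen = set()
--     answer = 0
--     for v in topping[:-1]:
--         seen.add(v)
--         remaining[v] -= 1
--         if remaining[v] == 0:
--             suffix_distinct -= 1
--         if len(seen) == suffix_distinct:
--             answer += 1
--     return answer
-- ===== Notes on version B (the rewrite author's own statement) =====
-- stated objective: alternative
-- what changed: Replaces A's build-two-lists-then-sort-then-index scheme with a single forward pass that maintains a multiset counter of the remaining suffix, decrementing it to track the suffix distinct count directly, so the sort and the reversed second pass disappear.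
import Mathlib
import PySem

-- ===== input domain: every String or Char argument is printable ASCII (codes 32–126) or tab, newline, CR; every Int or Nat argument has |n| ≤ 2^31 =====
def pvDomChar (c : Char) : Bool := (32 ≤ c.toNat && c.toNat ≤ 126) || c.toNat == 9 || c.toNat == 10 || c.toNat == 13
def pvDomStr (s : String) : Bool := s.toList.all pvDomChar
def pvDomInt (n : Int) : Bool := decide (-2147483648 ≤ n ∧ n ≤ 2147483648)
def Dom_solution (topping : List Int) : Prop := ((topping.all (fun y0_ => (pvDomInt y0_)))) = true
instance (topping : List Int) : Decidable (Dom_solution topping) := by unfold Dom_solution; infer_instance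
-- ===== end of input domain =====

-- B computes the answer in one forward pass over a suffix multiset counter instead of A's two distinct-count lists plus a sort (alternative algorithm, same observable result).


-- ===== PORT A =====
def solution (topping : List Int) : Int :=
  -- forward pass: forward_set grows, forward_list collects len(forward_set)
  let fwd := topping.foldl
    (fun (st : PySem.Set Int × List Int) v =>
      let s := PySem.Set.add st.1 v
      (s, st.2 ++ [PySem.Set.len s]))
    (PySem.Set.empty, [])
  -- backward pass over topping[::-1]
  let bwd := ((PySem.List.slice? topping none none (-1)).getD []).foldl
    (fun (st : PySem.Set Int × List Int) v =>
      let s := PySem.Set.add st.1 v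
      (s, st.2 ++ [PySem.Set.len s]))
    (PySem.Set.empty, [])
  -- backward_list.sort(reverse=True)
  let backward_list := PySem.List.sorted bwd.2 (fun x => x) true
  -- for i in range(len(topping)-1): if forward_list[i] == backward_list[i+1]: answer += 1
  (PySem.List.pyRange 0 (PySem.List.len topping - 1) 1).foldl
    (fun answer i =>
      if PySem.List.pyGetD fwd.2 i 0 = PySem.List.pyGetD backward_list (i + 1) 0
      then answer + 1 else answer)
    0

-- ===== PORT B =====
def solution_alt (topping : List Int) : Int :=
  -- remaining[v] = multiplicity of v in topping
  let remaining : PySem.Dict Int Int :=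
    topping.foldl (fun d v => d.insert v (d.getD v 0 + 1)) PySem.Dict.empty
  -- one pass over topping[:-1], maintaining (seen, remaining, suffix_distinct, answer)
  let st := (PySem.List.slice topping none (some (-1))).foldl
    (fun (st : PySem.Set Int × PySem.Dict Int Int × Int × Int) v =>
      let seen := PySem.Set.add st.1 v
      let rem := st.2.1.insert v (st.2.1.getD v 0 - 1)
      let sd := if rem.getD v 0 = 0 then st.2.2.1 - 1 else st.2.2.1
      let ans := if PySem.Set.len seen = sd then st.2.2.2 + 1 else st.2.2.2
      (seen, rem, sd, ans))
    (PySem.Set.empty, remaining, ((remaining.size : Int)), 0)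
  st.2.2.2

-- ===== PRECONDITION & SPEC =====
def Spec_solution (topping : List Int) (out : Int) : Prop := out = solution_alt topping
instance (topping : List Int) (out : Int) : Decidable (Spec_solution topping out) := by unfold Spec_solution; infer_instance

-- ===== CLAIM (what is proved, stated in full; the proofs are below) =====
def Claim_equal_solution : Prop := ∀ (topping : List Int), Dom_solution topping → Spec_solution topping (solution topping)

-- ===== LEMMAS AND PROOFS =====

-- distinct-element count of a list, as an Int
def dc (l : List Int) : Int := (l.toFinset.card : Int)

-- the sequence of running distinct counts produced by A's accumulation loops
def prefCounts (s : PySem.Set Int) : List Int → List Int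
  | [] => []
  | v :: t => PySem.Set.len (PySem.Set.add s v) :: prefCounts (PySem.Set.add s v) t

theorem setLen_ofList (l : List Int) : PySem.Set.len (PySem.Set.ofList l) = dc l := by
  have hnd := PySem.Set.nodup_ofList (α := Int) l
  have hf : (PySem.Set.ofList l).toFinset = l.toFinset := by
    ext x; simp [List.mem_toFinset, PySem.Set.mem_ofList]
  have hc := List.toFinset_card_of_nodup hnd
  unfold PySem.Set.len dc
  rw [← hc, hf]

theorem ofList_append_singleton (l : List Int) (v : Int) :
    PySem.Set.ofList (l ++ [v]) = PySem.Set.add (PySem.Set.ofList l) v := by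
  simp [PySem.Set.ofList_eq_foldl, List.foldl_append]

theorem foldA (l : List Int) (s : PySem.Set Int) (acc : List Int) :
    (l.foldl
      (fun (st : PySem.Set Int × List Int) v =>
        (PySem.Set.add st.1 v, st.2 ++ [PySem.Set.len (PySem.Set.add st.1 v)]))
      (s, acc)).2 = acc ++ prefCounts s l := by
  induction l generalizing s acc with
  | nil => simp [prefCounts]
  | cons v t ih =>
    simp only [List.foldl_cons]
    rw [ih]
    simp [prefCounts]

theorem prefCounts_eq (l : List Int) (s : PySem.Set Int) :
    prefCounts s l
      = (List.range l.length).map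
          (fun i => PySem.Set.len (PySem.Set.update s (l.take (i+1)))) := by
  induction l generalizing s with
  | nil => simp [prefCounts]
  | cons v t ih =>
    simp only [prefCounts, ih, List.length_cons, List.range_succ_eq_map, List.map_cons,
      List.map_map]
    exact congrArg₂ List.cons rfl (List.map_congr_left fun i _ => rfl)

theorem prefCounts_empty (l : List Int) :
    prefCounts PySem.Set.empty l = (List.range l.length).map (fun i => dc (l.take (i+1))) := by
  rw [prefCounts_eq]
  refine List.map_congr_left ?_
  intro i _
  have h : PySem.Set.update PySem.Set.empty (l.take (i+1)) = PySem.Set.ofList (l.take (i+1)) := by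
    rw [PySem.Set.ofList_eq_foldl]; rfl
  rw [h, setLen_ofList]

theorem dc_take_mono (l : List Int) {i j : Nat} (h : i ≤ j) : dc (l.take i) ≤ dc (l.take j) := by
  have hs : l.take i ⊆ l.take j := (List.take_prefix_take_left h).subset
  have hsub : (l.take i).toFinset ⊆ (l.take j).toFinset := by
    intro x hx
    rw [List.mem_toFinset] at *
    exact hs hx
  unfold dc
  exact_mod_cast Finset.card_le_card hsub

theorem sorted_rev_of_pairwise {l : List Int} (h : l.Pairwise (· ≤ ·)) :
    PySem.List.sorted l (fun x => x) true = l.reverse := by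
  apply PySem.List.eq_of_perm_of_pairwise_le_of_injective (key := fun x : Int => -x) neg_injective
  · exact (PySem.List.sorted_perm l _ true).trans l.reverse_perm.symm
  · exact (PySem.List.sorted_pairwise_rev l (fun x => x)).imp (by intro a b hb; simpa using hb)
  · rw [List.pairwise_reverse]
    exact h.imp (by intro a b hab; simpa using hab)

theorem dc_reverse (l : List Int) : dc l.reverse = dc l := by
  unfold dc; rw [List.toFinset_reverse]

theorem dc_cons (v : Int) (l : List Int) :
    dc (v :: l) = dc l + (if v ∈ l then 0 else 1) := by
  unfold dc
  rw [List.toFinset_cons]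
  by_cases hv : v ∈ l
  · rw [Finset.insert_eq_self.mpr (List.mem_toFinset.mpr hv), if_pos hv, add_zero]
  · rw [Finset.card_insert_of_notMem (by simp [hv]), if_neg hv]
    push_cast; ring

theorem rev_map_range (g : Nat → Int) (n : Nat) :
    ((List.range n).map g).reverse = (List.range n).map (fun j => g (n-1-j)) := by
  apply List.ext_getElem
  · simp
  · intro k h1 h2
    simp only [List.length_reverse, List.length_map, List.length_range] at h1 h2
    rw [List.getElem_reverse]
    simp [List.getElem_map, List.getElem_range]

theorem countP_range_succ_shift (P : Nat → Bool) (n : Nat) :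
    (List.range (n+1)).countP P
      = (List.range n).countP (fun j => P (j+1)) + (if P 0 then 1 else 0) := by
  rw [List.range_succ_eq_map, List.countP_cons]
  congr 1
  rw [List.countP_map]
  rfl

-- A's value, in closed form
theorem solution_eq_countP (topping : List Int) :
    solution topping
      = ((List.range (topping.length - 1)).countP
          (fun k => decide (dc (topping.take (k+1)) = dc (topping.drop (k+1)))) : Int) := by
  simp only [solution, PySem.List.slice?_none_none_neg_one, Option.getD_some, foldA,
    List.nil_append, prefCounts_empty, List.length_reverse]
  set n := topping.length with hn
  have hpw : ((List.range n).map (fun i => dc (topping.reverse.take (i+1)))).Pairwise (· ≤ ·) := by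
    rw [List.pairwise_map]
    exact List.pairwise_lt_range.imp (fun {i j} hij => dc_take_mono topping.reverse (by omega))
  rw [sorted_rev_of_pairwise hpw, rev_map_range]
  rw [PySem.List.len_eq, ← hn, PySem.List.pyRange_one]
  have htn : (((n : Int)) - 1 - 0).toNat = n - 1 := by omega
  rw [htn, List.foldl_map]
  rw [PySem.List.foldl_ite_add_one]
  rw [zero_add]
  congr 1
  refine List.countP_congr ?_
  intro k hk
  rw [List.mem_range] at hk
  have hk1 : k < n := by omega
  have hk2 : k + 1 < n := by omega
  have e1 : ((0:Int) + (k : Nat)) = ((k : Nat) : Int) := by omega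
  have e2 : (((k : Nat) : Int) + 1) = (((k+1 : Nat)) : Int) := by push_cast; ring
  rw [e1, e2, PySem.List.pyGetD_natCast, PySem.List.pyGetD_natCast,
    PySem.List.getD_map_range _ _ _ _ hk1, PySem.List.getD_map_range _ _ _ _ hk2]
  have e3 : n - 1 - (k+1) + 1 = n - (k+1) := by omega
  have e4 : topping.reverse.take (n - (k+1)) = (topping.drop (k+1)).reverse := by
    rw [List.take_reverse, show topping.length - (n - (k+1)) = k + 1 by rw [hn] at hk2 ⊢; omega]
  rw [e3, e4, dc_reverse]

-- B's loop invariant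
theorem loopB (l : List Int) : ∀ (p rest : List Int) (rem : PySem.Dict Int Int) (sd ans : Int),
    (∀ v, rem.getD v 0 = ((l ++ rest).count v : Int)) →
    sd = dc (l ++ rest) →
    (l.foldl
      (fun (st : PySem.Set Int × PySem.Dict Int Int × Int × Int) v =>
        (PySem.Set.add st.1 v,
         st.2.1.insert v (st.2.1.getD v 0 - 1),
         (if (st.2.1.insert v (st.2.1.getD v 0 - 1)).getD v 0 = 0
            then st.2.2.1 - 1 else st.2.2.1),
         (if PySem.Set.len (PySem.Set.add st.1 v)
              = (if (st.2.1.insert v (st.2.1.getD v 0 - 1)).getD v 0 = 0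
                   then st.2.2.1 - 1 else st.2.2.1)
            then st.2.2.2 + 1 else st.2.2.2)))
      (PySem.Set.ofList p, rem, sd, ans)).2.2.2
      = ans + ((List.range l.length).countP
          (fun j => decide (dc (p ++ l.take (j+1)) = dc (l.drop (j+1) ++ rest))) : Int) := by
  induction l with
  | nil => intro p rest rem sd ans _ _; simp
  | cons v t ih =>
    intro p rest rem sd ans hrem hsd
    have hrem' : ∀ w, (rem.insert v (rem.getD v 0 - 1)).getD w 0 = ((t ++ rest).count w : Int) := by
      intro w
      rw [PySem.Dict.getD_insert]
      by_cases hw : w = v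
      · subst hw
        rw [if_pos rfl, hrem w, List.cons_append, List.count_cons]
        simp only [BEq.rfl, if_true]
        push_cast; ring
      · rw [if_neg hw, hrem w, List.cons_append, List.count_cons]
        simp [Ne.symm hw]
    have hsd' : (if ((t ++ rest).count v : Int) = 0 then sd - 1 else sd) = dc (t ++ rest) := by
      rw [hsd, List.cons_append, dc_cons]
      by_cases hv : v ∈ t ++ rest
      · rw [if_neg (by have h := List.count_pos_iff.mpr hv; omega), if_pos hv]; ring
      · rw [if_pos (by exact_mod_cast List.count_eq_zero.mpr hv), if_neg hv]; ring
    rw [List.foldl_cons]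
    show (t.foldl _
        (PySem.Set.add (PySem.Set.ofList p) v,
         rem.insert v (rem.getD v 0 - 1),
         (if (rem.insert v (rem.getD v 0 - 1)).getD v 0 = 0 then sd - 1 else sd),
         (if PySem.Set.len (PySem.Set.add (PySem.Set.ofList p) v)
              = (if (rem.insert v (rem.getD v 0 - 1)).getD v 0 = 0 then sd - 1 else sd)
            then ans + 1 else ans))).2.2.2 = _
    rw [← ofList_append_singleton]
    simp only [hrem']
    rw [ih (p ++ [v]) rest _ _ _ hrem' hsd']
    rw [setLen_ofList, hsd']
    have h1 : (v::t).take 1 = [v] := rfl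
    have h2 : (v::t).drop 1 = t := rfl
    simp only [List.length_cons]
    rw [countP_range_succ_shift]
    have htail : (List.range t.length).countP
          (fun j => decide (dc (p ++ (v::t).take (j+1+1)) = dc ((v::t).drop (j+1+1) ++ rest)))
        = (List.range t.length).countP
          (fun j => decide (dc ((p ++ [v]) ++ t.take (j+1)) = dc (t.drop (j+1) ++ rest))) := by
      refine List.countP_congr ?_
      intro j _
      have a1 : (v::t).take (j+1+1) = v :: t.take (j+1) := rfl
      have a2 : (v::t).drop (j+1+1) = t.drop (j+1) := rfl
      rw [a1, a2, List.append_cons]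
    rw [htail]
    simp only [h1, h2, Nat.zero_add, decide_eq_true_eq]
    split_ifs with hc
    · push_cast; ring
    · push_cast; ring

-- B's value, in the same closed form
theorem solution_alt_eq_countP (topping : List Int) :
    solution_alt topping
      = ((List.range (topping.length - 1)).countP
          (fun k => decide (dc (topping.take (k+1)) = dc (topping.drop (k+1)))) : Int) := by
  simp only [solution_alt, PySem.List.slice_to_neg_one,
    PySem.Dict.foldl_insert_getD_add_one_eq_counter]
  by_cases h0 : topping = []
  · subst h0; simp
  · have hdl := List.dropLast_append_getLast h0
    have hsize : (((PySem.Dict.counter topping).size : Nat) : Int) = dc topping := by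
      have hk : (PySem.Dict.counter topping).keys = PySem.Set.ofList topping :=
        PySem.Dict.keys_counter topping
      have h1 : (PySem.Dict.counter topping).size = (PySem.Dict.counter topping).keys.length := by
        simp [PySem.Dict.keys, PySem.Dict.size]
      rw [h1, hk]
      exact setLen_ofList topping
    have hrem : ∀ v, (PySem.Dict.counter topping).getD v 0
        = (((topping.dropLast ++ [topping.getLast h0]).count v : Nat) : Int) := by
      intro v; rw [hdl]; exact PySem.Dict.getD_counter topping v
    have hsd : (((PySem.Dict.counter topping).size : Nat) : Int)
        = dc (topping.dropLast ++ [topping.getLast h0]) := by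
      rw [hdl]; exact hsize
    have hempty : (PySem.Set.empty : PySem.Set Int) = PySem.Set.ofList [] := rfl
    rw [hempty, loopB topping.dropLast [] [topping.getLast h0] _ _ _ hrem hsd]
    rw [zero_add, List.length_dropLast]
    congr 1
    refine List.countP_congr ?_
    intro j hj
    rw [List.mem_range] at hj
    have e1 : topping.dropLast.take (j+1) = topping.take (j+1) := by
      rw [List.dropLast_eq_take, List.take_take]
      congr 1
      omega
    have e2 : topping.dropLast.drop (j+1) ++ [topping.getLast h0] = topping.drop (j+1) := by
      conv_rhs => rw [← hdl]
      rw [List.drop_append_of_le_length (by rw [List.length_dropLast]; omega)]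
    rw [List.nil_append, e1, e2]

-- ===== VERDICT (by name: the statement is the Claim_ definition above) =====
theorem solution_spec : Claim_equal_solution := by
  intro topping _
  unfold Spec_solution
  rw [solution_eq_countP, solution_alt_eq_countP]
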